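-- pv_equiv track=rewrite | github.com/Mallory24/cae_modeling | eval_mep.py | get_candidate_video_frame_idx
-- ===== SOURCE A (Python) =====
-- def get_candidate_video_frame_idx(vid_seg_ids, c_v_masks):
-- 	candidate_vid_frame_idx = []
-- 	# prepare the masked ones
-- 	for vid_idx, masked_frames in enumerate(c_v_masks):
-- 		for idx, masked_frame in enumerate(masked_frames):
-- 			if masked_frame == True:
-- 				vid_seg_frame_idx = str(vid_seg_ids[vid_idx]) + "_" + str(idx)
-- 				candidate_vid_frame_idx.append(vid_seg_frame_idx)
--
-- 	# prepare the unmasked ones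
-- 	for vid_idx, masked_frames in enumerate(c_v_masks):
-- 		for idx, masked_frame in enumerate(masked_frames):
-- 			if masked_frame == False:
-- 				vid_seg_frame_idx = str(vid_seg_ids[vid_idx]) + "_" + str(idx)
-- 				candidate_vid_frame_idx.append(vid_seg_frame_idx)
--
-- 	return candidate_vid_frame_idx
-- ===== SOURCE B (Python) =====
-- def get_candidate_video_frame_idx(vid_seg_ids, c_v_masks):
-- 	masked = []
-- 	unmasked = []
-- 	for vid_idx, masked_frames in enumerate(c_v_masks):
-- 		for idx, masked_frame in enumerate(masked_frames):
-- 			s = str(vid_seg_ids[vid_idx]) + "_" + str(idx)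
-- 			if masked_frame == True:
-- 				masked.append(s)
-- 			elif masked_frame == False:
-- 				unmasked.append(s)
-- 	return masked + unmasked
-- ===== Notes on version B (the rewrite author's own statement) =====
-- stated objective: alternative
-- what changed: One pass over the masks builds two lists (masked, unmasked) and returns masked + unmasked, instead of A's two full scans of the nested array.
import Mathlib
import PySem

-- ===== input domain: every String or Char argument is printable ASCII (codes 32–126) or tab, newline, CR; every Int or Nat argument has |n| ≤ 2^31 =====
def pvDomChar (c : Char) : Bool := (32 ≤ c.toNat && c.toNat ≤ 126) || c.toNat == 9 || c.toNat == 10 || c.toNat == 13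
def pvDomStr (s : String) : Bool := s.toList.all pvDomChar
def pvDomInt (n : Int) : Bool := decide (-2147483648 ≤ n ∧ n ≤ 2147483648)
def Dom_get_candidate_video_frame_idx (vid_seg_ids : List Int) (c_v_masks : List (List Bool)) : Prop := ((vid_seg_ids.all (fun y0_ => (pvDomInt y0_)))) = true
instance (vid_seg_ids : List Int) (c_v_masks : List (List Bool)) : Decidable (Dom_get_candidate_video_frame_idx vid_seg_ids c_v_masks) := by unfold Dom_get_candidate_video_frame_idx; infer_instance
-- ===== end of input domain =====

-- B builds the masked and unmasked id lists in one pass over the masks and returns masked ++ unmasked,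
-- instead of A's two full scans of the nested array (same return value).

-- shared id-builder: str(vid_seg_ids[vid_idx]) + "_" + str(idx)
def pvFrameId (vid_seg_ids : List Int) (vid_idx idx : Nat) : String :=
  PySem.Int.toStr ((PySem.List.pyGet? vid_seg_ids (vid_idx : Int)).getD 0) ++ "_" ++ PySem.Int.toStr (idx : Int)

-- ===== PORT A =====
def get_candidate_video_frame_idx (vid_seg_ids : List Int) (c_v_masks : List (List Bool)) : List String :=
  -- first loop: the masked ones
  let acc := c_v_masks.zipIdx.foldl (fun acc p =>
      p.1.zipIdx.foldl (fun acc q =>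
        if q.1 == true then acc ++ [pvFrameId vid_seg_ids p.2 q.2] else acc) acc) []
  -- second loop: the unmasked ones, appended to the same list
  c_v_masks.zipIdx.foldl (fun acc p =>
      p.1.zipIdx.foldl (fun acc q =>
        if q.1 == false then acc ++ [pvFrameId vid_seg_ids p.2 q.2] else acc) acc) acc

-- ===== PORT B =====
def get_candidate_video_frame_idx_alt (vid_seg_ids : List Int) (c_v_masks : List (List Bool)) : List String :=
  let mu := c_v_masks.zipIdx.foldl (fun (mu : List String × List String) p =>
      p.1.zipIdx.foldl (fun (mu : List String × List String) q =>
        let s := pvFrameId vid_seg_ids p.2 q.2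
        if q.1 == true then (mu.1 ++ [s], mu.2)
        else if q.1 == false then (mu.1, mu.2 ++ [s])
        else mu) mu) ([], [])
  mu.1 ++ mu.2

-- ===== PRECONDITION & SPEC =====
-- Pre_ excludes exactly the inputs where Python A raises IndexError: a non-empty mask row whose
-- row index has no corresponding entry in vid_seg_ids.
def Pre_get_candidate_video_frame_idx (vid_seg_ids : List Int) (c_v_masks : List (List Bool)) : Prop :=
  ∀ p ∈ c_v_masks.zipIdx, p.1 ≠ [] → p.2 < vid_seg_ids.length
instance (vid_seg_ids : List Int) (c_v_masks : List (List Bool)) : Decidable (Pre_get_candidate_video_frame_idx vid_seg_ids c_v_masks) := by unfold Pre_get_candidate_video_frame_idx; infer_instance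
def pvWitness_get_candidate_video_frame_idx : List Int × List (List Bool) := ([5, -3], [[true, false], [false]])

def Spec_get_candidate_video_frame_idx (vid_seg_ids : List Int) (c_v_masks : List (List Bool)) (out : List String) : Prop := out = get_candidate_video_frame_idx_alt vid_seg_ids c_v_masks
instance (vid_seg_ids : List Int) (c_v_masks : List (List Bool)) (out : List String) : Decidable (Spec_get_candidate_video_frame_idx vid_seg_ids c_v_masks out) := by unfold Spec_get_candidate_video_frame_idx; infer_instance

-- ===== CLAIM (what is proved, stated in full; the proofs are below) =====
def Claim_equal_get_candidate_video_frame_idx : Prop := ∀ (vid_seg_ids : List Int) (c_v_masks : List (List Bool)), Dom_get_candidate_video_frame_idx vid_seg_ids c_v_masks → Pre_get_candidate_video_frame_idx vid_seg_ids c_v_masks → Spec_get_candidate_video_frame_idx vid_seg_ids c_v_masks (get_candidate_video_frame_idx vid_seg_ids c_v_masks)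

-- ===== LEMMAS AND PROOFS =====

-- one of A's two nested loops, characterised as a flatMap of filtered rows
theorem pvA_loop (vid : List Int) (b : Bool) (l : List (List Bool × Nat)) (acc : List String) :
    l.foldl (fun acc p =>
      p.1.zipIdx.foldl (fun acc q =>
        if q.1 == b then acc ++ [pvFrameId vid p.2 q.2] else acc) acc) acc
    = acc ++ l.flatMap (fun p =>
        (p.1.zipIdx.filter (fun q => q.1 == b)).map (fun q => pvFrameId vid p.2 q.2)) := by
  induction l generalizing acc with
  | nil => simp
  | cons h t ih =>
    rw [List.foldl_cons, PySem.List.foldl_append_if, ih]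
    simp

-- B's inner loop over one row, routing each id into the pair's two lists
theorem pvB_inner (g : Nat → String) (qs : List (Bool × Nat)) (m u : List String) :
    qs.foldl (fun (mu : List String × List String) q =>
        let s := g q.2
        if q.1 == true then (mu.1 ++ [s], mu.2)
        else if q.1 == false then (mu.1, mu.2 ++ [s])
        else mu) (m, u)
    = (m ++ (qs.filter (fun q => q.1 == true)).map (fun q => g q.2),
       u ++ (qs.filter (fun q => q.1 == false)).map (fun q => g q.2)) := by
  induction qs generalizing m u with
  | nil => simp
  | cons h t ih =>
    cases hb : h.1
    · rw [List.foldl_cons, hb]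
      show List.foldl _ (m, u ++ [g h.2]) t = _
      rw [ih]
      simp [hb]
    · rw [List.foldl_cons, hb]
      show List.foldl _ (m ++ [g h.2], u) t = _
      rw [ih]
      simp [hb]

-- B's whole fold
theorem pvB_outer (vid : List Int) (l : List (List Bool × Nat)) (m u : List String) :
    l.foldl (fun (mu : List String × List String) p =>
      p.1.zipIdx.foldl (fun (mu : List String × List String) q =>
        let s := pvFrameId vid p.2 q.2
        if q.1 == true then (mu.1 ++ [s], mu.2)
        else if q.1 == false then (mu.1, mu.2 ++ [s])
        else mu) mu) (m, u)
    = (m ++ l.flatMap (fun p =>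
          (p.1.zipIdx.filter (fun q => q.1 == true)).map (fun q => pvFrameId vid p.2 q.2)),
       u ++ l.flatMap (fun p =>
          (p.1.zipIdx.filter (fun q => q.1 == false)).map (fun q => pvFrameId vid p.2 q.2))) := by
  induction l generalizing m u with
  | nil => simp
  | cons h t ih =>
    rw [List.foldl_cons, pvB_inner, ih]
    simp

-- ===== VERDICT (by name: the statement is the Claim_ definition above) =====
theorem get_candidate_video_frame_idx_spec : Claim_equal_get_candidate_video_frame_idx := by
  intro vid c _ _
  unfold Spec_get_candidate_video_frame_idx get_candidate_video_frame_idx get_candidate_video_frame_idx_alt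
  rw [pvA_loop, pvA_loop, pvB_outer]
  simp
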